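-- pv_equiv track=rewrite | github.com/do-develop/python_practice | leet2057_smallest_index_with_equal_value.py | smallestEqual
-- ===== SOURCE A (Python) =====
-- from typing import List
--
-- def smallestEqual(nums: List[int]) -> int:
--     candidates = []
--     for i in range(len(nums)):
--         if i % 10 == nums[i]:
--             candidates.append(i)
--
--     if len(candidates) > 0:
--         return min(candidates)
--     return -1
-- ===== SOURCE B (Python) =====
-- def smallestEqual(nums):
--     for i, v in enumerate(nums):
--         if i % 10 == v:
--             return i
--     return -1
-- ===== Notes on version B (the rewrite author's own statement) =====
-- stated objective: simpler
-- what changed: Replaced A's collect-all-matching-indices-then-min two-pass structure with a single enumerate loop that returns the first match immediately (no candidate list, no min reduction), relying on increasing iteration order.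
import Mathlib
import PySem

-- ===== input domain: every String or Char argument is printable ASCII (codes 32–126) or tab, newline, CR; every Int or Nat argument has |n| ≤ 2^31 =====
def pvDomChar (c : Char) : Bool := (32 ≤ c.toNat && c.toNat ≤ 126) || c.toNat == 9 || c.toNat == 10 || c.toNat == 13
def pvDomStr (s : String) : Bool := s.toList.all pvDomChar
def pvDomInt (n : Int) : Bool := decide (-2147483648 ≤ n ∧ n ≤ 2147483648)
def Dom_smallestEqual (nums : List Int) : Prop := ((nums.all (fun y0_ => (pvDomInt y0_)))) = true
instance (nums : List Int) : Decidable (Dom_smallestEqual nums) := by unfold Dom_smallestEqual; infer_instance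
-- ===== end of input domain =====

-- B replaces A's collect-all-matches-then-min two passes with a single early-return scan (simpler; same O(n)).

-- ===== PORT A =====
-- candidates = []; for i in range(len(nums)): if i % 10 == nums[i]: candidates.append(i)
-- if len(candidates) > 0: return min(candidates); return -1
def smallestEqual (nums : List Int) : Int :=
  let candidates :=
    (PySem.List.pyRange 0 (nums.length : Int)).foldl
      (fun acc i =>
        if PySem.Int.mod i 10 == PySem.List.pyGetD nums i 0 then acc ++ [i] else acc) []
  if candidates.length > 0 then
    match PySem.List.min? candidates (fun x => x) with
    | some m => m
    | none => -1  -- unreachable: candidates is nonempty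
  else -1

-- ===== PORT B =====
-- for i, v in enumerate(nums): if i % 10 == v: return i
-- return -1
def smallestEqualGo : List Int → Nat → Int
  | [], _ => -1
  | v :: rest, i => if ((i % 10 : Nat) : Int) == v then (i : Int) else smallestEqualGo rest (i + 1)

def smallestEqual_alt (nums : List Int) : Int := smallestEqualGo nums 0

-- ===== PRECONDITION & SPEC =====
def Spec_smallestEqual (nums : List Int) (out : Int) : Prop := out = smallestEqual_alt nums
instance (nums : List Int) (out : Int) : Decidable (Spec_smallestEqual nums out) := by unfold Spec_smallestEqual; infer_instance

-- ===== CLAIM (what is proved, stated in full; the proofs are below) =====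
def Claim_equal_smallestEqual : Prop := ∀ (nums : List Int), Dom_smallestEqual nums → Spec_smallestEqual nums (smallestEqual nums)

-- ===== LEMMAS AND PROOFS =====

-- min of a strictly increasing list is its head
theorem min?_of_pairwise_lt (l : List Int) (hl : l.Pairwise (· < ·)) :
    (match PySem.List.min? l (fun x => x) with
     | some m => m
     | none => (-1 : Int)) =
    (match l.head? with
     | some m => m
     | none => (-1 : Int)) := by
  cases l with
  | nil =>
    have h0 : PySem.List.min? ([] : List Int) (fun x => x) = none :=
      (PySem.List.min?_eq_none_iff _ _).mpr rfl
    rw [h0]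
    simp
  | cons x t =>
    have hne : PySem.List.min? (x :: t) (fun x => x) ≠ none := by
      simp [PySem.List.min?_eq_none_iff]
    cases hmin : PySem.List.min? (x :: t) (fun x => x) with
    | none => exact absurd hmin hne
    | some m =>
      have hmem := PySem.List.min?_mem hmin
      have hle : m ≤ x := PySem.List.min?_isMin hmin x (by simp)
      rcases List.mem_cons.mp hmem with h | h
      · simp [h]
      · have : x < m := (List.pairwise_cons.mp hl).1 m h
        omega

-- the filtered range, read from offset k against the list xs, agrees with B's scan
theorem range'_filter_head (xs : List Int) (k : Nat) :
    (match ((List.range' k xs.length).filter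
        (fun j => ((j % 10 : Nat) : Int) == xs.getD (j - k) 0)).head? with
     | some m => ((m : Nat) : Int)
     | none => (-1 : Int)) = smallestEqualGo xs k := by
  induction xs generalizing k with
  | nil => simp [smallestEqualGo]
  | cons v rest ih =>
    rw [List.length_cons, List.range'_succ]
    by_cases h : ((k % 10 : Nat) : Int) == v
    · rw [List.filter_cons]
      have hp : ((k : Int)) % 10 = v := by
        have h' := beq_iff_eq.mp h
        exact_mod_cast h'
      rw [smallestEqualGo]
      simp [hp]
    · have hfc : ∀ j ∈ List.range' (k + 1) rest.length,
          (fun j => ((j % 10 : Nat) : Int) == (v :: rest).getD (j - k) 0) j =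
          (fun j => ((j % 10 : Nat) : Int) == rest.getD (j - (k + 1)) 0) j := by
        intro j hj
        have hk : k + 1 ≤ j := (List.mem_range'_1.mp hj).1
        have h1 : j - k = (j - (k + 1)) + 1 := by omega
        simp [h1]
      rw [List.filter_cons]
      simp only [Nat.sub_self, List.getD_cons_zero, h, List.filter_congr hfc]
      rw [smallestEqualGo]
      simp only [h]
      exact ih (k + 1)

theorem smallestEqual_eq_alt (nums : List Int) : smallestEqual nums = smallestEqual_alt nums := by
  unfold smallestEqual smallestEqual_alt
  rw [PySem.List.pyRange_zero_natCast, PySem.List.foldl_append_if_eq_filter, List.nil_append]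
  have hpred : ∀ j : Nat,
      (PySem.Int.mod ((j : Nat) : Int) 10 == PySem.List.pyGetD nums ((j : Nat) : Int) 0) =
      (((j % 10 : Nat) : Int) == nums.getD j 0) := by
    intro j
    have hmod : PySem.Int.mod ((j : Nat) : Int) 10 = ((j % 10 : Nat) : Int) := by
      exact_mod_cast PySem.Int.mod_natCast j 10
    rw [hmod, PySem.List.pyGetD_natCast]
  have hfm : (List.map (fun k : Nat => (k : Int)) (List.range nums.length)).filter
        (fun i => PySem.Int.mod i 10 == PySem.List.pyGetD nums i 0) =
      List.map (fun k : Nat => (k : Int))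
        ((List.range nums.length).filter (fun j => ((j % 10 : Nat) : Int) == nums.getD j 0)) := by
    rw [List.filter_map]
    congr 1
    apply List.filter_congr
    intro j _
    exact hpred j
  rw [hfm]
  set fl := (List.range nums.length).filter (fun j => ((j % 10 : Nat) : Int) == nums.getD j 0) with hfl
  have hpw : (List.map (fun k : Nat => (k : Int)) fl).Pairwise (· < ·) := by
    apply List.Pairwise.map
    · intro a b hab
      exact_mod_cast hab
    · exact (List.pairwise_lt_range).filter _
  have hthis := range'_filter_head nums 0
  simp only [Nat.sub_zero, ← List.range_eq_range'] at hthis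
  by_cases hlen : 0 < (List.map (fun k : Nat => (k : Int)) fl).length
  · rw [if_pos hlen, min?_of_pairwise_lt _ hpw, List.head?_map]
    rw [← hthis]
    cases fl.head? <;> simp
  · rw [if_neg hlen]
    have hnil : fl = [] := by
      cases hfl' : fl with
      | nil => rfl
      | cons a t => rw [hfl'] at hlen; simp at hlen
    rw [← hthis, ← hfl, hnil]
    simp

-- ===== VERDICT (by name: the statement is the Claim_ definition above) =====
theorem smallestEqual_spec : Claim_equal_smallestEqual := by
  intro nums _
  unfold Spec_smallestEqual
  exact smallestEqual_eq_alt nums
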